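-- pv_equiv track=rewrite | github.com/clodon2/JRTI-Coding | CryptACorey.py | buildCypherString
-- ===== SOURCE A (Python) =====
-- def buildCypherString(password, decrypters):
--     cpypassword = password
--
--     for i in range(0, len(decrypters)):
--         chrctr = decrypters[i]
--         chkr = cpypassword.count(chrctr)
--
--         if chkr == 0:
--             cpypassword += chrctr
--
--     return cpypassword
-- ===== SOURCE B (Python) =====
-- def buildCypherString(password, decrypters):
--     additions = ''.join(c for c in dict.fromkeys(decrypters) if c not in password)
--     return password + additions
-- ===== Notes on version B (the rewrite author's own statement) =====
-- stated objective: simpler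
-- what changed: Replaces A's growing-accumulator loop (membership tested against the mutating copy of the password) with order-preserving dedup of decrypters followed by a filter against the fixed original password, then one concatenation.
import Mathlib
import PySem

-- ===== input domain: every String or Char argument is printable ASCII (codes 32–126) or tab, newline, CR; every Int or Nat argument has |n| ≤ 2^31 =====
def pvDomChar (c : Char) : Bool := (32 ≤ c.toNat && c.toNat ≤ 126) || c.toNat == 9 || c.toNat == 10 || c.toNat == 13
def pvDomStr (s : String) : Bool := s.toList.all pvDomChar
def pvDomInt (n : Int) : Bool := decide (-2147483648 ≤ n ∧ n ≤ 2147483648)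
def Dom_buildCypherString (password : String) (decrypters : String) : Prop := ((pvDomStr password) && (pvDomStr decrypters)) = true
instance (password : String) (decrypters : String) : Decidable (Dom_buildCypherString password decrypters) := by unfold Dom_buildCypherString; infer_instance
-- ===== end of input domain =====

-- B deduplicates decrypters (first-occurrence order) and filters against the fixed
-- original password, instead of A's loop that appends while testing the growing copy. Objective: simpler.

-- ===== PORT A =====
-- A's loop over decrypters, carrying the growing copy of the password;
-- `count c == 0` is Python's `cpypassword.count(chrctr) == 0`.
def goA_buildCypherString (cpy : List Char) : List Char → List Char
  | [] => cpy
  | c :: rest => goA_buildCypherString (if cpy.count c == 0 then cpy ++ [c] else cpy) rest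

def buildCypherString (password : String) (decrypters : String) : String :=
  String.ofList (goA_buildCypherString password.toList decrypters.toList)

-- ===== PORT B =====
-- dict.fromkeys: distinct chars of the list in first-occurrence order.
def dedupB_buildCypherString (seen : List Char) : List Char → List Char
  | [] => []
  | c :: rest =>
      if seen.contains c then dedupB_buildCypherString seen rest
      else c :: dedupB_buildCypherString (seen ++ [c]) rest

def buildCypherString_alt (password : String) (decrypters : String) : String :=
  password ++ String.ofList
    ((dedupB_buildCypherString [] decrypters.toList).filter
      (fun c => !password.toList.contains c))

-- ===== PRECONDITION & SPEC =====
def Spec_buildCypherString (password : String) (decrypters : String) (out : String) : Prop := out = buildCypherString_alt password decrypters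
instance (password : String) (decrypters : String) (out : String) : Decidable (Spec_buildCypherString password decrypters out) := by unfold Spec_buildCypherString; infer_instance

-- ===== CLAIM (what is proved, stated in full; the proofs are below) =====
def Claim_equal_buildCypherString : Prop := ∀ (password : String) (decrypters : String), Dom_buildCypherString password decrypters → Spec_buildCypherString password decrypters (buildCypherString password decrypters)

-- ===== LEMMAS AND PROOFS =====

lemma key_buildCypherString (p : List Char) :
    ∀ (d cpy seen : List Char),
      (∀ x, x ∈ cpy ↔ x ∈ seen ∨ x ∈ p) →
      goA_buildCypherString cpy d
        = cpy ++ (dedupB_buildCypherString seen d).filter (fun c => !p.contains c) := by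
  intro d
  induction d with
  | nil => intro cpy seen _; simp [goA_buildCypherString, dedupB_buildCypherString]
  | cons c rest ih =>
    intro cpy seen hinv
    by_cases hs : c ∈ seen
    · have hc : c ∈ cpy := (hinv c).2 (Or.inl hs)
      have h1 : (cpy.count c == 0) = false := by
        simp [List.count_eq_zero, hc]
      have h2 : seen.contains c = true := by simpa [List.contains_iff_mem] using hs
      simp only [goA_buildCypherString, dedupB_buildCypherString, h1, h2,
        Bool.false_eq_true, if_false, if_true]
      exact ih cpy seen hinv
    · have h2 : seen.contains c = false := by simpa [List.contains_iff_mem] using hs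
      by_cases hp : c ∈ p
      · have hc : c ∈ cpy := (hinv c).2 (Or.inr hp)
        have h1 : (cpy.count c == 0) = false := by
          simp [List.count_eq_zero, hc]
        have hp' : p.contains c = true := by simpa [List.contains_iff_mem] using hp
        simp only [goA_buildCypherString, dedupB_buildCypherString, h1, h2,
          Bool.false_eq_true, if_false, List.filter_cons, hp', Bool.not_true]
        apply ih
        intro x
        rw [hinv x]
        constructor
        · rintro (h | h)
          · exact Or.inl (by simp [h])
          · exact Or.inr h
        · rintro (h | h)
          · rcases List.mem_append.mp h with h' | h'
            · exact Or.inl h'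
            · simp at h'; subst h'; exact Or.inr hp
          · exact Or.inr h
      · have hc : c ∉ cpy := fun h => ((hinv c).1 h).elim hs hp
        have h1 : (cpy.count c == 0) = true := by
          simp [List.count_eq_zero, hc]
        have hp' : p.contains c = false := by simpa [List.contains_iff_mem] using hp
        simp only [goA_buildCypherString, dedupB_buildCypherString, h1, h2,
          Bool.false_eq_true, if_false, List.filter_cons, hp', Bool.not_false,
          if_pos]
        rw [ih (cpy ++ [c]) (seen ++ [c]) ?_]
        · simp
        · intro x
          by_cases hx : x = c
          · subst hx; simp
          · simp only [List.mem_append, List.mem_singleton, hx, or_false]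
            rw [hinv x]

-- ===== VERDICT (by name: the statement is the Claim_ definition above) =====
theorem buildCypherString_spec : Claim_equal_buildCypherString := by
  intro password decrypters _
  unfold Spec_buildCypherString buildCypherString buildCypherString_alt
  rw [key_buildCypherString password.toList decrypters.toList password.toList []
      (by intro x; simp)]
  rw [String.ofList_append, String.ofList_toList]
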